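-- pv_equiv track=rewrite | github.com/Yuuya-San/petsonaVPS | petsona/app/utils/compatibility_engine.py | _get_category_for_question
-- ===== SOURCE A (Python) =====
-- def _get_category_for_question(question_key: str) -> str:
--     """Map question to category dimension"""
--     categories = {
--         'lifestyle': ['energy_level', 'exercise_needs', 'noise_level', 'social_needs', 'handling_tolerance'],
--         'experience': ['experience_required', 'trainability', 'temperament_tolerance'],
--         'space': ['space_needs', 'environment_complexity', 'min_enclosure_size'],
--         'care': ['daily_care_time', 'grooming_needs'],
--         'household': ['child_friendly', 'dog_friendly', 'cat_friendly', 'small_pet_friendly'],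
--         'financial': ['monthly_cost_level', 'emergency_care_risk', 'lifetime_cost_level', 'care_cost'],
--         'health': ['preventive_care_level', 'stress_sensitivity', 'common_health_issues', 'lifespan'],
--         'safety': ['prey_drive', 'okay_fragile', 'okay_permit', 'okay_special_vet'],
--     }
--     for category, questions in categories.items():
--         if question_key in questions:
--             return category
--     return 'lifestyle'
-- ===== SOURCE B (Python) =====
-- _QUESTION_TO_CATEGORY = {
--     'energy_level': 'lifestyle',
--     'exercise_needs': 'lifestyle',
--     'noise_level': 'lifestyle',
--     'social_needs': 'lifestyle',
--     'handling_tolerance': 'lifestyle',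
--     'experience_required': 'experience',
--     'trainability': 'experience',
--     'temperament_tolerance': 'experience',
--     'space_needs': 'space',
--     'environment_complexity': 'space',
--     'min_enclosure_size': 'space',
--     'daily_care_time': 'care',
--     'grooming_needs': 'care',
--     'child_friendly': 'household',
--     'dog_friendly': 'household',
--     'cat_friendly': 'household',
--     'small_pet_friendly': 'household',
--     'monthly_cost_level': 'financial',
--     'emergency_care_risk': 'financial',
--     'lifetime_cost_level': 'financial',
--     'care_cost': 'financial',
--     'preventive_care_level': 'health',
--     'stress_sensitivity': 'health',
--     'common_health_issues': 'health',
--     'lifespan': 'health',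
--     'prey_drive': 'safety',
--     'okay_fragile': 'safety',
--     'okay_permit': 'safety',
--     'okay_special_vet': 'safety',
-- }
--
--
-- def _get_category_for_question(question_key: str) -> str:
--     """Map question to category dimension"""
--     return _QUESTION_TO_CATEGORY.get(question_key, 'lifestyle')
-- ===== Notes on version B (the rewrite author's own statement) =====
-- stated objective: idiomatic
-- what changed: Replaces the per-call construction of a category->questions dict and the loop with membership scans by a single module-level inverted question->category dict, so the body is one .get with the same default fallback.
import Mathlib
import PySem

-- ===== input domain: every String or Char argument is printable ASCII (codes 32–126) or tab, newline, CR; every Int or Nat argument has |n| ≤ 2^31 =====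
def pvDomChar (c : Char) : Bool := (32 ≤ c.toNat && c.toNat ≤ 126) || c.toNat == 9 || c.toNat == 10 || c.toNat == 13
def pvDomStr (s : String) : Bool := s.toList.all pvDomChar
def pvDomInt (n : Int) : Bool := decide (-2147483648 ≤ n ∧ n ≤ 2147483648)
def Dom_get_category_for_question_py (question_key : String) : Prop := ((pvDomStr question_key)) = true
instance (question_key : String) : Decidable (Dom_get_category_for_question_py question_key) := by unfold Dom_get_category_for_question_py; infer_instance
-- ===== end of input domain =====

-- B replaces A's per-call nested dict and membership-scanning loop by one precomputed
-- flat question->category dict looked up with a 'lifestyle' default (idiomatic; same values).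

-- ===== PORT A =====
-- the 'for category, questions in categories.items(): if question_key in questions: return category' loop
def pvLoopA (question_key : String) : List (String × List String) → String
  | [] => "lifestyle"
  | (category, questions) :: rest =>
      if questions.contains question_key then category else pvLoopA question_key rest

def get_category_for_question_py (question_key : String) : String :=
  let categories : PySem.Dict String (List String) := PySem.Dict.ofList
    [ ("lifestyle", ["energy_level", "exercise_needs", "noise_level", "social_needs", "handling_tolerance"]),
      ("experience", ["experience_required", "trainability", "temperament_tolerance"]),
      ("space", ["space_needs", "environment_complexity", "min_enclosure_size"]),
      ("care", ["daily_care_time", "grooming_needs"]),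
      ("household", ["child_friendly", "dog_friendly", "cat_friendly", "small_pet_friendly"]),
      ("financial", ["monthly_cost_level", "emergency_care_risk", "lifetime_cost_level", "care_cost"]),
      ("health", ["preventive_care_level", "stress_sensitivity", "common_health_issues", "lifespan"]),
      ("safety", ["prey_drive", "okay_fragile", "okay_permit", "okay_special_vet"]) ]
  pvLoopA question_key categories.items

-- ===== PORT B =====
-- the module-level flat dict _QUESTION_TO_CATEGORY (literal, distinct keys)
def pvQuestionToCategory : PySem.Dict String String := PySem.Dict.mk
  [ ("energy_level", "lifestyle"), ("exercise_needs", "lifestyle"), ("noise_level", "lifestyle"),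
    ("social_needs", "lifestyle"), ("handling_tolerance", "lifestyle"),
    ("experience_required", "experience"), ("trainability", "experience"), ("temperament_tolerance", "experience"),
    ("space_needs", "space"), ("environment_complexity", "space"), ("min_enclosure_size", "space"),
    ("daily_care_time", "care"), ("grooming_needs", "care"),
    ("child_friendly", "household"), ("dog_friendly", "household"), ("cat_friendly", "household"),
    ("small_pet_friendly", "household"),
    ("monthly_cost_level", "financial"), ("emergency_care_risk", "financial"),
    ("lifetime_cost_level", "financial"), ("care_cost", "financial"),
    ("preventive_care_level", "health"), ("stress_sensitivity", "health"),
    ("common_health_issues", "health"), ("lifespan", "health"),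
    ("prey_drive", "safety"), ("okay_fragile", "safety"), ("okay_permit", "safety"),
    ("okay_special_vet", "safety") ]

def get_category_for_question_py_alt (question_key : String) : String :=
  pvQuestionToCategory.getD question_key "lifestyle"

-- ===== PRECONDITION & SPEC =====
def Spec_get_category_for_question_py (question_key : String) (out : String) : Prop := out = get_category_for_question_py_alt question_key
instance (question_key : String) (out : String) : Decidable (Spec_get_category_for_question_py question_key out) := by unfold Spec_get_category_for_question_py; infer_instance

-- ===== CLAIM (what is proved, stated in full; the proofs are below) =====
def Claim_equal_get_category_for_question_py : Prop := ∀ (question_key : String), Dom_get_category_for_question_py question_key → Spec_get_category_for_question_py question_key (get_category_for_question_py question_key)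

-- ===== LEMMAS AND PROOFS =====

-- looking up k in a block of pairs (q, c) followed by rest = scanning the question list qs
theorem pv_getD_block (k c d : String) (qs : List String) (rest : List (String × String)) :
    (PySem.Dict.mk (qs.map (fun q => (q, c)) ++ rest)).getD k d
      = if qs.contains k then c else (PySem.Dict.mk rest).getD k d := by
  induction qs with
  | nil => rfl
  | cons q qs ih =>
      rw [List.map_cons, List.cons_append, PySem.Dict.getD_eq_get?_getD, PySem.Dict.get?_mk_cons]
      by_cases h : q = k
      · simp [h]
      · have hqk : (q == k) = false := by simp [h]
        have hkq : (k == q) = false := by simp [Ne.symm h]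
        simp only [hqk, Bool.false_eq_true, if_false]
        rw [← PySem.Dict.getD_eq_get?_getD, ih, List.contains_cons, hkq]
        simp

-- A's loop over the nested category lists = one lookup in the flattened dict
theorem pv_loop_eq_flat (k : String) (cats : List (String × List String)) :
    pvLoopA k cats
      = (PySem.Dict.mk (cats.flatMap (fun p => p.2.map (fun q => (q, p.1))))).getD k "lifestyle" := by
  induction cats with
  | nil => rfl
  | cons p rest ih =>
      obtain ⟨c, qs⟩ := p
      rw [List.flatMap_cons, pv_getD_block]
      simp only [pvLoopA]
      rw [ih]

-- ===== VERDICT (by name: the statement is the Claim_ definition above) =====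
theorem get_category_for_question_py_spec : Claim_equal_get_category_for_question_py := by
  intro question_key _
  unfold Spec_get_category_for_question_py
  unfold get_category_for_question_py get_category_for_question_py_alt
  rw [pv_loop_eq_flat]
  rfl
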